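-- pv_equiv track=rewrite | github.com/haosulab/ManiSkill | mani_skill/utils/scene_builder/robocasa/utils/scene_registry.py | unpack_style_ids
-- ===== SOURCE A (Python) =====
-- from collections import OrderedDict
-- from enum import IntEnum
--
-- class StyleType(IntEnum):
--     """
--     Enums for available styles in RoboCasa environment
--     """
--
--     INDUSTRIAL = 0
--     SCANDANAVIAN = 1
--     COASTAL = 2
--     MODERN_1 = 3
--     MODERN_2 = 4
--     TRADITIONAL_1 = 5
--     TRADITIONAL_2 = 6
--     FARMHOUSE = 7
--     RUSTIC = 8
--     MEDITERRANEAN = 9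
--     TRANSITIONAL_1 = 10
--     TRANSITIONAL_2 = 11
--
--     # negative values correspond to groups
--     ALL = -1
--
-- STYLE_GROUPS_TO_IDS = {
--     -1: list(range(12)),  # all
-- }
--
-- def unpack_style_ids(style_ids):
--     if style_ids is None:
--         style_ids = StyleType.ALL
--
--     if not isinstance(style_ids, list):
--         style_ids = [style_ids]
--
--     style_ids = [int(id) for id in style_ids]
--
--     all_style_ids = []
--     for id in style_ids:
--         if id < 0:
--             all_style_ids += STYLE_GROUPS_TO_IDS[id]
--         else:
--             all_style_ids.append(id)
--     return list(OrderedDict.fromkeys(all_style_ids))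
-- ===== SOURCE B (Python) =====
-- STYLE_GROUPS_TO_IDS = {
--     -1: list(range(12)),  # all
-- }
--
-- def unpack_style_ids(style_ids):
--     # Right-to-left fold: expand each id and prepend it, subtracting its elements
--     # from the result built so far (dedup by list subtraction, no set/dict).
--     if style_ids is None:
--         style_ids = -1
--     if not isinstance(style_ids, list):
--         style_ids = [style_ids]
--     style_ids = [int(id) for id in style_ids]
--
--     result = []
--     for id in reversed(style_ids):
--         head = STYLE_GROUPS_TO_IDS[id] if id < 0 else [id]
--         result = head + [y for y in result if y not in head]
--     return result
-- ===== Notes on version B (the rewrite author's own statement) =====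
-- stated objective: alternative
-- what changed: A appends everything into one flat list and deduplicates it afterwards with OrderedDict.fromkeys; B folds the id list right-to-left with no set or dict at all: each id's expansion is prepended to the accumulated result after subtracting its elements from that result (dedup by list subtraction).
import Mathlib
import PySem

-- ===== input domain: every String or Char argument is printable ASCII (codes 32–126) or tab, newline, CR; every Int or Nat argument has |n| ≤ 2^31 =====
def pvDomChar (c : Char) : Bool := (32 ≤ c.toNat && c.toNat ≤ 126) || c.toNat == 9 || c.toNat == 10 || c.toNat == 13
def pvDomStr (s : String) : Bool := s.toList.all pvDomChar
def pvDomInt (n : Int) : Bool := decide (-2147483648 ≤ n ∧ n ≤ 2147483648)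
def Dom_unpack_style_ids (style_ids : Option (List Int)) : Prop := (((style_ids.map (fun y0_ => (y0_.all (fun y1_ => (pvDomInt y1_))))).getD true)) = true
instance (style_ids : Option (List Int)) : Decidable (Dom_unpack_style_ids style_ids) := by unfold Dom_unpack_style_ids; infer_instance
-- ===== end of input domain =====

-- A builds the whole expanded list and dedups it afterwards; B recurses on the id list and
-- dedups by subtracting the head's expansion from the tail's recursive result (alternative decomposition).

-- ===== PORT A =====
-- STYLE_GROUPS_TO_IDS = {-1: list(range(12))}
def styleGroupsToIds : PySem.Dict Int (List Int) := PySem.Dict.ofList [((-1 : Int), PySem.List.pyRange 0 12 1)]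

def unpack_style_ids (style_ids : Option (List Int)) : List Int :=
  -- None → StyleType.ALL (= -1), then wrapped in a list; int() on an int is the identity
  let ids : List Int := match style_ids with
    | none => [-1]
    | some l => l
  let all_style_ids : List Int := ids.foldl (fun acc id =>
      if id < 0 then
        acc ++ ((PySem.Dict.get? styleGroupsToIds id).getD [])  -- get? = none is KeyError, excluded by Pre_
      else
        acc ++ [id]) []
  PySem.List.dedup all_style_ids  -- list(OrderedDict.fromkeys(...))

-- ===== PORT B =====
-- the reversed-loop accumulation 'result = head + [y for y in result if y not in head]'
-- is the right fold over the id list: pvGo below is that fold written as structural recursion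
def pvGo (ids : List Int) : List Int :=
  match ids with
  | [] => []
  | a :: t =>
      let head : List Int := if a < 0 then (PySem.Dict.get? styleGroupsToIds a).getD [] else [a]
      head ++ (pvGo t).filter (fun y => !head.contains y)

def unpack_style_ids_alt (style_ids : Option (List Int)) : List Int :=
  let ids : List Int := match style_ids with
    | none => [-1]
    | some l => l
  pvGo ids

-- ===== PRECONDITION & SPEC =====
-- Pre_ excludes inputs containing a negative id other than -1: there the Python raises KeyError
-- (STYLE_GROUPS_TO_IDS has only the key -1) — both A and B raise identically on those inputs.
def Pre_unpack_style_ids (style_ids : Option (List Int)) : Prop :=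
  ∀ id ∈ style_ids.getD [], id < 0 → id = -1
instance (style_ids : Option (List Int)) : Decidable (Pre_unpack_style_ids style_ids) := by unfold Pre_unpack_style_ids; infer_instance

def pvWitness_unpack_style_ids : Option (List Int) := some [3, -1, 3, 0]

def Spec_unpack_style_ids (style_ids : Option (List Int)) (out : List Int) : Prop := out = unpack_style_ids_alt style_ids
instance (style_ids : Option (List Int)) (out : List Int) : Decidable (Spec_unpack_style_ids style_ids out) := by unfold Spec_unpack_style_ids; infer_instance

-- ===== CLAIM (what is proved, stated in full; the proofs are below) =====
def Claim_equal_unpack_style_ids : Prop := ∀ (style_ids : Option (List Int)), Dom_unpack_style_ids style_ids → Pre_unpack_style_ids style_ids → Spec_unpack_style_ids style_ids (unpack_style_ids style_ids)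

-- ===== LEMMAS AND PROOFS =====

-- the per-id expansion both programs perform
def pvExpand (id : Int) : List Int :=
  if id < 0 then (PySem.Dict.get? styleGroupsToIds id).getD [] else [id]

theorem get?_groups (id : Int) :
    PySem.Dict.get? styleGroupsToIds id
      = if id == -1 then some (PySem.List.pyRange 0 12 1) else none := by
  have hit : styleGroupsToIds.items = [((-1 : Int), PySem.List.pyRange 0 12 1)] := rfl
  simp only [PySem.Dict.get?, hit]
  by_cases h : id = -1
  · simp [h]
  · have : ((-1 : Int) == id) = false := by simpa using fun hc => h hc.symm
    simp [List.find?, this, h]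

theorem pvExpand_nodup (id : Int) : (pvExpand id).Nodup := by
  unfold pvExpand
  split
  · rw [get?_groups]
    by_cases h : id = -1
    · simp only [h]; decide
    · simp [h]
  · simp

theorem foldl_expand_flat (ids : List Int) (acc : List Int) :
    ids.foldl (fun acc id => acc ++ pvExpand id) acc = acc ++ ids.flatMap pvExpand := by
  induction ids generalizing acc with
  | nil => simp
  | cons a t ih => simp [ih, List.flatMap_cons, List.append_assoc]

-- foldl add over h ++ s only appends elements not already in h
theorem foldl_add_append (r : List Int) (h s : List Int) :
    r.foldl PySem.Set.add (h ++ s)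
      = h ++ (r.filter (fun y => !h.contains y)).foldl PySem.Set.add s := by
  induction r generalizing s with
  | nil => simp
  | cons a t ih =>
    simp only [List.foldl_cons, List.filter_cons]
    by_cases ha : a ∈ h
    · have h1 : PySem.Set.add (h ++ s) a = h ++ s := by
        simp [PySem.Set.add, ha]
      have h2 : (!h.contains a) = false := by simpa using ha
      rw [h1, h2, if_neg (by simp), ih]
    · have h2 : (!h.contains a) = true := by simpa using ha
      by_cases hs : a ∈ s
      · have h1 : PySem.Set.add (h ++ s) a = h ++ s := by
          simp [PySem.Set.add, hs]
        have h3 : PySem.Set.add s a = s := by simp [PySem.Set.add, hs]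
        rw [h1, h2, if_pos rfl, ih, List.foldl_cons, h3]
      · have h1 : PySem.Set.add (h ++ s) a = h ++ (s ++ [a]) := by
          simp [PySem.Set.add, ha, hs]
        have h3 : PySem.Set.add s a = s ++ [a] := by simp [PySem.Set.add, hs]
        rw [h1, h2, if_pos rfl, ih, List.foldl_cons, h3]

-- filter commutes with the add-fold (hence with Set.ofList / dedup)
theorem filter_foldl_add (p : Int → Bool) (r s : List Int) :
    (r.foldl PySem.Set.add s).filter p = (r.filter p).foldl PySem.Set.add (s.filter p) := by
  induction r generalizing s with
  | nil => rfl
  | cons a t ih =>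
    simp only [List.foldl_cons, List.filter_cons]
    have step : (PySem.Set.add s a).filter p
        = if p a then PySem.Set.add (s.filter p) a else s.filter p := by
      by_cases hm : a ∈ s
      · have hf : a ∈ s.filter p ∨ ¬ p a := by
          by_cases hp : p a
          · exact Or.inl (List.mem_filter.mpr ⟨hm, hp⟩)
          · exact Or.inr hp
        by_cases hp : p a
        · have : a ∈ s.filter p := List.mem_filter.mpr ⟨hm, hp⟩
          simp [PySem.Set.add, hm, hp, this]
        · simp [PySem.Set.add, hm, hp]
      · by_cases hp : p a
        · have hnf : a ∉ s.filter p := fun hc => hm (List.mem_filter.mp hc).1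
          simp [PySem.Set.add, hm, hp, hnf]
        · simp [PySem.Set.add, hm, hp]
    rw [ih (PySem.Set.add s a), step]
    by_cases hp : p a <;> simp [hp]

theorem foldl_add_nodup (l : List Int) : ∀ (s : List Int), l.Nodup → (∀ x ∈ l, x ∉ s) →
    l.foldl PySem.Set.add s = s ++ l := by
  induction l with
  | nil => simp
  | cons a t ih =>
    intro s hn hd
    have ha : a ∉ s := hd a (by simp)
    have h1 : PySem.Set.add s a = s ++ [a] := by simp [PySem.Set.add, ha]
    rw [List.foldl_cons, h1,
      ih (s ++ [a]) (List.nodup_cons.mp hn).2 (fun x hx => by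
        simp only [List.mem_append, List.mem_singleton]
        rintro (h | h)
        · exact hd x (by simp [hx]) h
        · exact (List.nodup_cons.mp hn).1 (h ▸ hx))]
    simp

-- dedup of h ++ r, h duplicate-free: h first, then r's dedup with h's elements removed
theorem dedup_append_nodup (h r : List Int) (hn : h.Nodup) :
    PySem.List.dedup (h ++ r)
      = h ++ (PySem.List.dedup r).filter (fun y => !h.contains y) := by
  simp only [PySem.List.dedup_eq_ofList, PySem.Set.ofList_eq_foldl, List.foldl_append]
  rw [foldl_add_nodup h [] hn (by simp), List.nil_append]
  have h1 := foldl_add_append r h []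
  rw [List.append_nil] at h1
  rw [h1, filter_foldl_add, List.filter_nil]

theorem pvGo_eq_dedup (ids : List Int) :
    pvGo ids = PySem.List.dedup (ids.flatMap pvExpand) := by
  induction ids with
  | nil => rfl
  | cons a t ih =>
    have hhead : (if a < 0 then (PySem.Dict.get? styleGroupsToIds a).getD [] else [a]) = pvExpand a := rfl
    rw [pvGo, hhead, ih, List.flatMap_cons,
        dedup_append_nodup (pvExpand a) (t.flatMap pvExpand) (pvExpand_nodup a)]

-- ===== VERDICT (by name: the statement is the Claim_ definition above) =====
theorem unpack_style_ids_spec : Claim_equal_unpack_style_ids := by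
  intro style_ids _ _
  show unpack_style_ids style_ids = unpack_style_ids_alt style_ids
  unfold unpack_style_ids unpack_style_ids_alt
  have hbody : (fun (acc : List Int) (id : Int) =>
      if id < 0 then acc ++ ((PySem.Dict.get? styleGroupsToIds id).getD []) else acc ++ [id])
      = (fun acc id => acc ++ pvExpand id) := by
    funext acc id; simp only [pvExpand]; split <;> rfl
  cases style_ids <;>
    simp only [hbody, foldl_expand_flat, List.nil_append, pvGo_eq_dedup]
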